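-- pv_equiv track=rewrite | github.com/bryonymoody/PolyChron | src/polychron/mcmc.py | upp_samp_3
-- ===== SOURCE A (Python) =====
-- def upp_samp_3(theta_samp, phis_samp, m, A, P, SAMP_VEC_TRACK, KEY_REF, PHI_REF, CONT_TYPE):
--     """Upper sample 3 - phase with prev phase abbuting and next phase abbuting or gap"""
--     limits = [
--         max(
--             [
--                 theta_samp[i]
--                 for i, j in enumerate(KEY_REF)
--                 if j == PHI_REF[SAMP_VEC_TRACK[m]] and CONT_TYPE[i] == "normal"
--             ]
--             + [phis_samp[m + 1]]
--         ),
--         min(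
--             [
--                 theta_samp[i]
--                 for i, j in enumerate(KEY_REF)
--                 if j == PHI_REF[SAMP_VEC_TRACK[m - 1]] and CONT_TYPE[i] == "normal"
--             ]
--             + [phis_samp[m - 2]]
--         ),
--     ]
--     _ = phis_samp
--     return limits
-- ===== SOURCE B (Python) =====
-- def upp_samp_3(theta_samp, phis_samp, m, A, P, SAMP_VEC_TRACK, KEY_REF, PHI_REF, CONT_TYPE):
--     """Upper sample 3 - build a hash index key -> positions once, then aggregate
--     only the two looked-up groups (no full filtering scans)."""
--     hi = phis_samp[m + 1]
--     lo = phis_samp[m - 2]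
--     if KEY_REF:
--         index = {}
--         for i, j in enumerate(KEY_REF):
--             index.setdefault(j, []).append(i)
--         t_up = PHI_REF[SAMP_VEC_TRACK[m]]
--         for i in index.get(t_up, []):
--             if CONT_TYPE[i] == "normal":
--                 hi = max(hi, theta_samp[i])
--         t_dn = PHI_REF[SAMP_VEC_TRACK[m - 1]]
--         for i in index.get(t_dn, []):
--             if CONT_TYPE[i] == "normal":
--                 lo = min(lo, theta_samp[i])
--     return [hi, lo]
-- ===== Notes on version B (the rewrite author's own statement) =====
-- stated objective: alternative
-- what changed: Replaces A's two full filtering comprehensions (each scanning KEY_REF and re-evaluating the group key per element) by building a hash index key -> positions in one pass and then aggregating only the two directly looked-up groups with running max/min.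
import Mathlib
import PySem

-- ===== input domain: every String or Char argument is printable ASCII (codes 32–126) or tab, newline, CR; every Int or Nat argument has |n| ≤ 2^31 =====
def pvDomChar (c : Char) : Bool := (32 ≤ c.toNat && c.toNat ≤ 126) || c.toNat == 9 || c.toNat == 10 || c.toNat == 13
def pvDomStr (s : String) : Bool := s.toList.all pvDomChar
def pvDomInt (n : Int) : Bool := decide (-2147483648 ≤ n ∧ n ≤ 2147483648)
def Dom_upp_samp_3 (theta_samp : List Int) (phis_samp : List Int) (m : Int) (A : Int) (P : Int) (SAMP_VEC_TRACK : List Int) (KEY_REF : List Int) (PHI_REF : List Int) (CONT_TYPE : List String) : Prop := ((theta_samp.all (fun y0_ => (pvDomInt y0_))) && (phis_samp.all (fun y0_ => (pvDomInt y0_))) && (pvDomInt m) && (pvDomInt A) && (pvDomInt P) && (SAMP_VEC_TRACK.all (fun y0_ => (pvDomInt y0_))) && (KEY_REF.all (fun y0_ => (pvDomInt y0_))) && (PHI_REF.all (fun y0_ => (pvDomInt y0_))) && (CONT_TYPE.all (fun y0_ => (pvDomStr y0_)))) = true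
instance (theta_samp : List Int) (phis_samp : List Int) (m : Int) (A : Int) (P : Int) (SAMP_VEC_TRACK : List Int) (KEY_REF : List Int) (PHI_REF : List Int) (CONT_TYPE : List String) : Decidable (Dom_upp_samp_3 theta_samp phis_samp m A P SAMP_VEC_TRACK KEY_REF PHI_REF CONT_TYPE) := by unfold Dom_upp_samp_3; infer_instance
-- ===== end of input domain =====

-- B builds a hash index key -> positions once and aggregates only the two looked-up
-- groups, instead of A's two full filtering comprehensions (objective: alternative).


-- ===== PORT A =====
-- literal transliteration of A: two filtering comprehensions over enumerate(KEY_REF),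
-- then max(group + [phis_samp[m+1]]) and min(group + [phis_samp[m-2]]);
-- pyGetD is total here, exact under Pre_ (Python raises IndexError outside it).
def upp_samp_3 (theta_samp : List Int) (phis_samp : List Int) (m : Int) (A : Int) (P : Int) (SAMP_VEC_TRACK : List Int) (KEY_REF : List Int) (PHI_REF : List Int) (CONT_TYPE : List String) : List Int :=
  let up_group := (PySem.List.enumerate KEY_REF 0).filterMap (fun p =>
      if p.2 = PySem.List.pyGetD PHI_REF (PySem.List.pyGetD SAMP_VEC_TRACK m 0) 0 ∧
         PySem.List.pyGetD CONT_TYPE p.1 "" = "normal"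
      then some (PySem.List.pyGetD theta_samp p.1 0) else none)
  let dn_group := (PySem.List.enumerate KEY_REF 0).filterMap (fun p =>
      if p.2 = PySem.List.pyGetD PHI_REF (PySem.List.pyGetD SAMP_VEC_TRACK (m - 1) 0) 0 ∧
         PySem.List.pyGetD CONT_TYPE p.1 "" = "normal"
      then some (PySem.List.pyGetD theta_samp p.1 0) else none)
  [(PySem.List.max? (up_group ++ [PySem.List.pyGetD phis_samp (m + 1) 0]) (fun y => y)).getD 0,
   (PySem.List.min? (dn_group ++ [PySem.List.pyGetD phis_samp (m - 2) 0]) (fun y => y)).getD 0]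

-- ===== PORT B =====
-- transliteration of Source B: seed hi/lo; if KEY_REF is nonempty, build the dict
-- index : key -> list of positions (setdefault-append loop), then fold running
-- max / min over the two looked-up groups only.
def upp_samp_3_alt (theta_samp : List Int) (phis_samp : List Int) (m : Int) (A : Int) (P : Int) (SAMP_VEC_TRACK : List Int) (KEY_REF : List Int) (PHI_REF : List Int) (CONT_TYPE : List String) : List Int :=
  let hi0 := PySem.List.pyGetD phis_samp (m + 1) 0
  let lo0 := PySem.List.pyGetD phis_samp (m - 2) 0
  if KEY_REF = [] then [hi0, lo0]
  else
    let index := (PySem.List.enumerate KEY_REF 0).foldl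
        (fun d p => d.modify p.2 ([] : List Int) (· ++ [p.1])) PySem.Dict.empty
    let tUp := PySem.List.pyGetD PHI_REF (PySem.List.pyGetD SAMP_VEC_TRACK m 0) 0
    let hi := (index.getD tUp []).foldl (fun x i =>
        if PySem.List.pyGetD CONT_TYPE i "" = "normal" then max x (PySem.List.pyGetD theta_samp i 0) else x) hi0
    let tDn := PySem.List.pyGetD PHI_REF (PySem.List.pyGetD SAMP_VEC_TRACK (m - 1) 0) 0
    let lo := (index.getD tDn []).foldl (fun x i =>
        if PySem.List.pyGetD CONT_TYPE i "" = "normal" then min x (PySem.List.pyGetD theta_samp i 0) else x) lo0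
    [hi, lo]

-- ===== PRECONDITION & SPEC =====
-- Pre_ excludes exactly the inputs where the Python A raises IndexError (the phis_samp
-- seeds; and, when KEY_REF is nonempty, the SAMP_VEC_TRACK/PHI_REF lookups and the
-- CONT_TYPE/theta_samp accesses of matching positions). A returns on everything else.
def Pre_upp_samp_3 (theta_samp : List Int) (phis_samp : List Int) (m : Int) (A : Int) (P : Int) (SAMP_VEC_TRACK : List Int) (KEY_REF : List Int) (PHI_REF : List Int) (CONT_TYPE : List String) : Prop :=
  PySem.Raise.InRange phis_samp.length (m + 1) ∧
  PySem.Raise.InRange phis_samp.length (m - 2) ∧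
  (KEY_REF = [] ∨
    (PySem.Raise.InRange SAMP_VEC_TRACK.length m ∧
     PySem.Raise.InRange SAMP_VEC_TRACK.length (m - 1) ∧
     PySem.Raise.InRange PHI_REF.length (PySem.List.pyGetD SAMP_VEC_TRACK m 0) ∧
     PySem.Raise.InRange PHI_REF.length (PySem.List.pyGetD SAMP_VEC_TRACK (m - 1) 0) ∧
     (∀ p ∈ PySem.List.enumerate KEY_REF 0,
        (p.2 = PySem.List.pyGetD PHI_REF (PySem.List.pyGetD SAMP_VEC_TRACK m 0) 0 ∨
         p.2 = PySem.List.pyGetD PHI_REF (PySem.List.pyGetD SAMP_VEC_TRACK (m - 1) 0) 0) →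
        p.1 < (CONT_TYPE.length : Int) ∧
        (PySem.List.pyGetD CONT_TYPE p.1 "" = "normal" → p.1 < (theta_samp.length : Int)))))
instance (theta_samp : List Int) (phis_samp : List Int) (m : Int) (A : Int) (P : Int) (SAMP_VEC_TRACK : List Int) (KEY_REF : List Int) (PHI_REF : List Int) (CONT_TYPE : List String) : Decidable (Pre_upp_samp_3 theta_samp phis_samp m A P SAMP_VEC_TRACK KEY_REF PHI_REF CONT_TYPE) := by unfold Pre_upp_samp_3; infer_instance

def pvWitness_upp_samp_3 : List Int × List Int × Int × Int × Int × List Int × List Int × List Int × List String :=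
  ([5], [0, 1, 2], 1, 0, 0, [0, 0], [7], [7], ["normal"])

def Spec_upp_samp_3 (theta_samp : List Int) (phis_samp : List Int) (m : Int) (A : Int) (P : Int) (SAMP_VEC_TRACK : List Int) (KEY_REF : List Int) (PHI_REF : List Int) (CONT_TYPE : List String) (out : List Int) : Prop := out = upp_samp_3_alt theta_samp phis_samp m A P SAMP_VEC_TRACK KEY_REF PHI_REF CONT_TYPE
instance (theta_samp : List Int) (phis_samp : List Int) (m : Int) (A : Int) (P : Int) (SAMP_VEC_TRACK : List Int) (KEY_REF : List Int) (PHI_REF : List Int) (CONT_TYPE : List String) (out : List Int) : Decidable (Spec_upp_samp_3 theta_samp phis_samp m A P SAMP_VEC_TRACK KEY_REF PHI_REF CONT_TYPE out) := by unfold Spec_upp_samp_3; infer_instance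

-- ===== CLAIM (what is proved, stated in full; the proofs are below) =====
def Claim_equal_upp_samp_3 : Prop := ∀ (theta_samp : List Int) (phis_samp : List Int) (m : Int) (A : Int) (P : Int) (SAMP_VEC_TRACK : List Int) (KEY_REF : List Int) (PHI_REF : List Int) (CONT_TYPE : List String), Dom_upp_samp_3 theta_samp phis_samp m A P SAMP_VEC_TRACK KEY_REF PHI_REF CONT_TYPE → Pre_upp_samp_3 theta_samp phis_samp m A P SAMP_VEC_TRACK KEY_REF PHI_REF CONT_TYPE → Spec_upp_samp_3 theta_samp phis_samp m A P SAMP_VEC_TRACK KEY_REF PHI_REF CONT_TYPE (upp_samp_3 theta_samp phis_samp m A P SAMP_VEC_TRACK KEY_REF PHI_REF CONT_TYPE)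

-- ===== LEMMAS AND PROOFS =====

theorem pvFoldl_max_comm (xs : List Int) (a b : Int) :
    xs.foldl max (max a b) = max (xs.foldl max a) b := by
  induction xs generalizing a b with
  | nil => rfl
  | cons c t ih =>
    simp only [List.foldl_cons]
    rw [max_right_comm, ih]

theorem pvFoldl_min_comm (xs : List Int) (a b : Int) :
    xs.foldl min (min a b) = min (xs.foldl min a) b := by
  induction xs generalizing a b with
  | nil => rfl
  | cons c t ih =>
    simp only [List.foldl_cons]
    rw [min_right_comm, ih]

-- Python max(l + [s]) as the running-max loop with seed s.
theorem pvMax_append_seed (l : List Int) (s : Int) :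
    (PySem.List.max? (l ++ [s]) (fun y => y)).getD 0 = l.foldl max s := by
  cases l with
  | nil => simp [PySem.List.max?]
  | cons x xs =>
    rw [List.cons_append, PySem.List.max?_id_cons]
    simp only [Option.getD_some, List.foldl_append, List.foldl_cons, List.foldl_nil]
    rw [show xs.foldl max (max s x) = xs.foldl max (max x s) by rw [max_comm],
        pvFoldl_max_comm, max_comm]

theorem pvMin_append_seed (l : List Int) (s : Int) :
    (PySem.List.min? (l ++ [s]) (fun y => y)).getD 0 = l.foldl min s := by
  cases l with
  | nil => simp [PySem.List.min?]
  | cons x xs =>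
    rw [List.cons_append, PySem.List.min?_id_cons]
    simp only [Option.getD_some, List.foldl_append, List.foldl_cons, List.foldl_nil]
    rw [show xs.foldl min (min s x) = xs.foldl min (min x s) by rw [min_comm],
        pvFoldl_min_comm, min_comm]

-- the setdefault-append index loop: what lands under key k is exactly the
-- positions whose key equals k, in order.
theorem pvIndex_getD (L : List (Int × Int)) (d : PySem.Dict Int (List Int)) (k : Int) :
    (L.foldl (fun d p => d.modify p.2 ([] : List Int) (· ++ [p.1])) d).getD k []
      = d.getD k [] ++ (L.filter (fun p => p.2 == k)).map (·.1) := by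
  induction L generalizing d with
  | nil => simp
  | cons q t ih =>
    simp only [List.foldl_cons, ih, List.filter_cons]
    by_cases h : q.2 = k
    · subst h
      rw [PySem.Dict.getD_modify_self]
      simp
    · rw [PySem.Dict.getD_modify_of_ne]
      · simp [h]
      · exact fun he => h he.symm

-- A's filtered comprehension fold = B's per-group running fold over the index entries.
theorem pvGroup_max (L : List (Int × Int)) (k : Int) (C : Int → Prop) [DecidablePred C]
    (f : Int → Int) (s : Int) :
    (L.filterMap (fun p => if p.2 = k ∧ C p.1 then some (f p.1) else none)).foldl max s
      = ((L.filter (fun p => p.2 == k)).map (·.1)).foldl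
          (fun x i => if C i then max x (f i) else x) s := by
  induction L generalizing s with
  | nil => rfl
  | cons q t ih =>
    simp only [List.filterMap_cons, List.filter_cons]
    by_cases h1 : q.2 = k
    · by_cases h2 : C q.1 <;> simp [h1, h2, ih]
    · simp [h1, ih]

theorem pvGroup_min (L : List (Int × Int)) (k : Int) (C : Int → Prop) [DecidablePred C]
    (f : Int → Int) (s : Int) :
    (L.filterMap (fun p => if p.2 = k ∧ C p.1 then some (f p.1) else none)).foldl min s
      = ((L.filter (fun p => p.2 == k)).map (·.1)).foldl
          (fun x i => if C i then min x (f i) else x) s := by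
  induction L generalizing s with
  | nil => rfl
  | cons q t ih =>
    simp only [List.filterMap_cons, List.filter_cons]
    by_cases h1 : q.2 = k
    · by_cases h2 : C q.1 <;> simp [h1, h2, ih]
    · simp [h1, ih]

theorem upp_samp_3_agree (theta_samp : List Int) (phis_samp : List Int) (m : Int) (A : Int) (P : Int) (SAMP_VEC_TRACK : List Int) (KEY_REF : List Int) (PHI_REF : List Int) (CONT_TYPE : List String) :
    upp_samp_3 theta_samp phis_samp m A P SAMP_VEC_TRACK KEY_REF PHI_REF CONT_TYPE
      = upp_samp_3_alt theta_samp phis_samp m A P SAMP_VEC_TRACK KEY_REF PHI_REF CONT_TYPE := by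
  simp only [upp_samp_3, upp_samp_3_alt]
  by_cases hk : KEY_REF = []
  · subst hk
    simp [PySem.List.enumerate, PySem.List.max?, PySem.List.min?]
  · rw [if_neg hk]
    rw [pvMax_append_seed, pvMin_append_seed, pvIndex_getD, pvIndex_getD,
        PySem.Dict.getD_empty, PySem.Dict.getD_empty, List.nil_append, List.nil_append,
        pvGroup_max _ _ (fun i => PySem.List.pyGetD CONT_TYPE i "" = "normal")
          (fun i => PySem.List.pyGetD theta_samp i 0),
        pvGroup_min _ _ (fun i => PySem.List.pyGetD CONT_TYPE i "" = "normal")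
          (fun i => PySem.List.pyGetD theta_samp i 0)]

-- ===== VERDICT (by name: the statement is the Claim_ definition above) =====
theorem upp_samp_3_spec : Claim_equal_upp_samp_3 := by
  intro theta_samp phis_samp m A P SAMP_VEC_TRACK KEY_REF PHI_REF CONT_TYPE _ _
  exact upp_samp_3_agree theta_samp phis_samp m A P SAMP_VEC_TRACK KEY_REF PHI_REF CONT_TYPE
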